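-- pv_equiv track=rewrite | github.com/linhdvu14/cp-sols | sols/CodeForces/1684_d12/E_MEX_vs_DIFF.py | solve
-- ===== SOURCE A (Python) =====
-- def solve(N, K, A):
--     if K >= N: return 0
--
--     cnt = {}
--     for a in A: cnt[a] = cnt.get(a, 0) + 1
--
--     # can jump <= K times
--     M = 0
--     for _ in range(K):
--         while M in cnt: M += 1
--         M += 1
--     while M in cnt: M += 1
--
--     # by transforming <= K remaining eles, using lowest-count first
--     B = [(c, a) for a, c in cnt.items() if a > M]
--     B.sort()
--     for i, (c, _) in enumerate(B):
--         K -= c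
--         if K < 0: return len(B) - i
--
--     return 0
-- ===== SOURCE B (Python) =====
-- def solve(N, K, A):
--     if K >= N:
--         return 0
--
--     cnt = {}
--     for a in A:
--         cnt[a] = cnt.get(a, 0) + 1
--
--     # M = the (K+1)-th non-negative integer absent from A, found in one
--     # ascending scan over the distinct values instead of repeated probing
--     m = K if K > 0 else 0
--     for v in sorted(cnt):
--         if 0 <= v <= m:
--             m += 1
--
--     # greedily erase whole values above m, cheapest counts first
--     counts = sorted(c for v, c in cnt.items() if v > m)
--     taken = 0
--     rem = K
--     for c in counts:
--         if rem < c: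
--             break
--         rem -= c
--         taken += 1
--     return len(counts) - taken
-- ===== Notes on version B (the rewrite author's own statement) =====
-- stated objective: alternative
-- what changed: B replaces A's repeated membership-probing loop (while M in cnt, K+1 rounds) by a single ascending scan over the sorted distinct values that computes the (K+1)-th missing non-negative integer, and replaces A's lex-sorted (count,value) pair list with early-return indexing by a sorted plain count list consumed by a greedy take counter.
import Mathlib
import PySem

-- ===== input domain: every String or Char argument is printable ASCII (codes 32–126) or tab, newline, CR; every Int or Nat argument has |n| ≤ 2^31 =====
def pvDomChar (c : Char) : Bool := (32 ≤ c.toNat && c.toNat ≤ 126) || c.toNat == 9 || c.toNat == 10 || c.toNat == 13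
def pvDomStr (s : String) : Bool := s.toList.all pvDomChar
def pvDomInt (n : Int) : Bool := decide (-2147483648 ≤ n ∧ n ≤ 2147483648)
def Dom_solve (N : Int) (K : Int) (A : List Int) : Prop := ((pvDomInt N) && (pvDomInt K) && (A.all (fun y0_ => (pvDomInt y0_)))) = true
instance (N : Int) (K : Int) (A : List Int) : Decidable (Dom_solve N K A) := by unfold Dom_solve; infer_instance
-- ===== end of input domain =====

-- B replaces A's repeated `while M in cnt` probing by one ascending scan over the sorted
-- distinct values, and A's lex-sorted (count,value) pairs by a sorted plain count list;
-- same asymptotic cost (alternative algorithm, not claimed faster).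

-- ===== PORT A =====
-- termination lemma cited by pvSkip's decreasing_by
lemma pvSkip_measure (L : List Int) (M : Int) (h : M ∈ L) :
    L.countP (fun x => decide (M + 1 ≤ x)) < L.countP (fun x => decide (M ≤ x)) := by
  induction L with
  | nil => simp at h
  | cons y t ih =>
    have hle : t.countP (fun x => decide (M + 1 ≤ x)) ≤ t.countP (fun x => decide (M ≤ x)) :=
      List.countP_mono_left (by intro a _ ha; simp_all; omega)
    rcases List.mem_cons.mp h with h | h
    · subst h; simp only [List.countP_cons, decide_eq_true_eq]; split_ifs <;> omega
    · have := ih h; simp only [List.countP_cons, decide_eq_true_eq]; split_ifs <;> omega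

-- `while M in cnt: M += 1`
def pvSkip (L : List Int) (M : Int) : Int :=
  if h : M ∈ L then pvSkip L (M + 1) else M
termination_by L.countP (fun x => decide (M ≤ x))
decreasing_by exact pvSkip_measure L M h

-- `for i, (c, _) in enumerate(B): K -= c; if K < 0: return len(B) - i` / trailing `return 0`
def pvEnumLoop : List (Int × Int) → Int → Int
  | [], _ => 0
  | (c, _) :: rest, K =>
      let K := K - c
      if K < 0 then (rest.length : Int) + 1 else pvEnumLoop rest K

def solve (N : Int) (K : Int) (A : List Int) : Int :=
  if K ≥ N then 0
  else
    let cnt : PySem.Dict Int Int :=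
      A.foldl (fun d a => d.insert a (d.getD a 0 + 1)) PySem.Dict.empty
    let M0 : Int := (PySem.List.pyRange 0 K 1).foldl (fun M _ => pvSkip cnt.keys M + 1) 0
    let M : Int := pvSkip cnt.keys M0
    let B : List (Int × Int) :=
      PySem.List.sorted2 ((cnt.items.filter (fun p => decide (p.1 > M))).map (fun p => (p.2, p.1)))
        Prod.fst Prod.snd
    pvEnumLoop B K

-- ===== PORT B =====
-- `for c in counts: if rem < c: break; rem -= c; taken += 1` — returns `taken`
def pvTake : List Int → Int → Int
  | [], _ => 0
  | c :: rest, rem => if rem < c then 0 else 1 + pvTake rest (rem - c)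

def solve_alt (N : Int) (K : Int) (A : List Int) : Int :=
  if K ≥ N then 0
  else
    let cnt : PySem.Dict Int Int :=
      A.foldl (fun d a => d.insert a (d.getD a 0 + 1)) PySem.Dict.empty
    let m : Int :=
      (PySem.List.sorted cnt.keys (fun x => x)).foldl
        (fun m v => if 0 ≤ v ∧ v ≤ m then m + 1 else m) (if K > 0 then K else 0)
    let counts : List Int :=
      PySem.List.sorted ((cnt.items.filter (fun p => decide (p.1 > m))).map Prod.snd) (fun x => x)
    (counts.length : Int) - pvTake counts K

-- ===== PRECONDITION & SPEC =====
def Spec_solve (N : Int) (K : Int) (A : List Int) (out : Int) : Prop := out = solve_alt N K A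
instance (N : Int) (K : Int) (A : List Int) (out : Int) : Decidable (Spec_solve N K A out) := by unfold Spec_solve; infer_instance

-- ===== CLAIM (what is proved, stated in full; the proofs are below) =====
def Claim_equal_solve : Prop := ∀ (N : Int) (K : Int) (A : List Int), Dom_solve N K A → Spec_solve N K A (solve N K A)

-- ===== LEMMAS AND PROOFS =====

-- count of L-elements in [a, b), as a Nat
def pvIco (L : List Int) (a b : Int) : Nat := L.countP (fun x => decide (a ≤ x ∧ x < b))

lemma pvNodupSubsetLen (l1 l2 : List Int) (h : l1.Nodup) (hs : l1 ⊆ l2) :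
    l1.length ≤ l2.length := by
  calc l1.length = l1.toFinset.card := by rw [List.toFinset_card_of_nodup h]
    _ ≤ l2.toFinset.card := Finset.card_le_card (by intro x hx; simp at *; exact hs hx)
    _ ≤ l2.length := l2.toFinset_card_le

lemma pvIco_le (L : List Int) (hnd : L.Nodup) (a b : Int) : pvIco L a b ≤ (b - a).toNat := by
  unfold pvIco
  rw [List.countP_eq_length_filter]
  have hsub : L.filter (fun x => decide (a ≤ x ∧ x < b)) ⊆ PySem.List.pyRange a b 1 := by
    intro x hx
    have hm := List.of_mem_filter hx
    simp only [decide_eq_true_eq] at hm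
    exact (PySem.List.mem_pyRange_one).mpr ⟨hm.1, hm.2⟩
  have := pvNodupSubsetLen _ _ (hnd.filter _) hsub
  rw [PySem.List.length_pyRange_one] at this
  exact this

lemma pvIco_full (L : List Int) (hnd : L.Nodup) (a b : Int) (hab : a ≤ b)
    (hall : ∀ x, a ≤ x → x < b → x ∈ L) : (pvIco L a b : Int) = b - a := by
  have hle := pvIco_le L hnd a b
  have hge : (b - a).toNat ≤ pvIco L a b := by
    unfold pvIco
    rw [List.countP_eq_length_filter]
    have hsub : PySem.List.pyRange a b 1 ⊆ L.filter (fun x => decide (a ≤ x ∧ x < b)) := by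
      intro x hx
      have hm := (PySem.List.mem_pyRange_one).mp hx
      exact List.mem_filter.mpr ⟨hall x hm.1 hm.2, by simp [hm.1, hm.2]⟩
    have := pvNodupSubsetLen _ _ (PySem.List.nodup_pyRange_one a b) hsub
    rw [PySem.List.length_pyRange_one] at this
    exact this
  omega

lemma pvIco_split (L : List Int) (a b c : Int) (h1 : a ≤ b) (h2 : b ≤ c) :
    pvIco L a c = pvIco L a b + pvIco L b c := by
  unfold pvIco
  induction L with
  | nil => simp
  | cons y t ih =>
    simp only [List.countP_cons, decide_eq_true_eq]
    split_ifs <;> omega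

lemma pvIco_empty (L : List Int) (a b : Int) (h : b ≤ a) : pvIco L a b = 0 := by
  unfold pvIco
  rw [List.countP_eq_zero]
  intro x _
  simp only [decide_eq_true_eq]
  omega

lemma pvIco_unit_not_mem (L : List Int) (a : Int) (h : a ∉ L) : pvIco L a (a + 1) = 0 := by
  unfold pvIco
  rw [List.countP_eq_zero]
  intro x hx
  simp only [decide_eq_true_eq]
  intro hc
  have : x = a := by omega
  exact absurd (this ▸ hx) h

lemma pvSkip_spec (L : List Int) (M : Int) :
    M ≤ pvSkip L M ∧ pvSkip L M ∉ L ∧ ∀ x, M ≤ x → x < pvSkip L M → x ∈ L := by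
  induction M using pvSkip.induct L with
  | case1 M h ih =>
    rw [pvSkip, dif_pos h]
    refine ⟨by omega, ih.2.1, ?_⟩
    intro x hx1 hx2
    by_cases hxM : x = M
    · exact hxM ▸ h
    · exact ih.2.2 x (by omega) hx2
  | case2 M h =>
    rw [pvSkip, dif_neg h]
    exact ⟨le_refl _, h, by intro x h1 h2; omega⟩

-- invariant through A's jump loop
lemma pvA_loop (L : List Int) (hnd : L.Nodup) (l : List Int) (M : Int) (n : Nat)
    (h0 : 0 ≤ M) (hc : (pvIco L 0 M : Int) = M - n) :
    0 ≤ l.foldl (fun M _ => pvSkip L M + 1) M ∧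
      (pvIco L 0 (l.foldl (fun M _ => pvSkip L M + 1) M) : Int) =
        l.foldl (fun M _ => pvSkip L M + 1) M - (n + l.length) := by
  induction l generalizing M n with
  | nil => exact ⟨h0, by simpa using hc⟩
  | cons x l ih =>
    obtain ⟨hMr, hrn, hall⟩ := pvSkip_spec L M
    have h1 : pvIco L 0 (pvSkip L M + 1) =
        pvIco L 0 M + pvIco L M (pvSkip L M) + pvIco L (pvSkip L M) (pvSkip L M + 1) := by
      rw [pvIco_split L 0 (pvSkip L M) (pvSkip L M + 1) (by omega) (by omega),
        pvIco_split L 0 M (pvSkip L M) h0 hMr]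
    have h2 : (pvIco L M (pvSkip L M) : Int) = pvSkip L M - M := pvIco_full L hnd M _ hMr hall
    have h3 : pvIco L (pvSkip L M) (pvSkip L M + 1) = 0 := pvIco_unit_not_mem L _ hrn
    have hc' : (pvIco L 0 (pvSkip L M + 1) : Int) = (pvSkip L M + 1) - (↑(n + 1)) := by
      rw [h1]; push_cast; omega
    have hrec := ih (pvSkip L M + 1) (n + 1) (by omega) hc'
    simp only [List.foldl_cons, List.length_cons]
    refine ⟨hrec.1, ?_⟩
    have h4 := hrec.2
    push_cast at h4 ⊢
    omega

-- B's scan does not move once every remaining value exceeds the state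
lemma pvB_stuck (l : List Int) (t : Int) (h : ∀ x ∈ l, t < x) :
    l.foldl (fun m v => if 0 ≤ v ∧ v ≤ m then m + 1 else m) t = t := by
  induction l generalizing t with
  | nil => rfl
  | cons x l ih =>
    have hx := h x (by simp)
    simp only [List.foldl_cons]
    rw [if_neg (by omega)]
    exact ih t (fun y hy => h y (by simp [hy]))

lemma pvB_fold (l : List Int) (hs : l.Pairwise (· < ·)) (t : Int) (ht : 0 ≤ t) :
    t ≤ l.foldl (fun m v => if 0 ≤ v ∧ v ≤ m then m + 1 else m) t ∧
      l.foldl (fun m v => if 0 ≤ v ∧ v ≤ m then m + 1 else m) t ∉ l ∧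
      (pvIco l 0 (l.foldl (fun m v => if 0 ≤ v ∧ v ≤ m then m + 1 else m) t) : Int) =
        l.foldl (fun m v => if 0 ≤ v ∧ v ≤ m then m + 1 else m) t - t := by
  induction l generalizing t with
  | nil => refine ⟨le_refl _, by simp, by simp [pvIco]⟩
  | cons v l ih =>
    have hv : ∀ y ∈ l, v < y := fun y hy => List.rel_of_pairwise_cons hs hy
    have hs' : l.Pairwise (· < ·) := hs.of_cons
    simp only [List.foldl_cons]
    by_cases hcond : 0 ≤ v ∧ v ≤ t
    · rw [if_pos hcond]
      obtain ⟨ih1, ih2, ih3⟩ := ih hs' (t + 1) (by omega)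
      refine ⟨by omega, ?_, ?_⟩
      · simp only [List.mem_cons, not_or]
        exact ⟨by omega, ih2⟩
      · simp only [pvIco, List.countP_cons, decide_eq_true_eq] at ih3 ⊢
        rw [if_pos (by constructor <;> omega)]
        push_cast
        omega
    · rw [if_neg hcond]
      by_cases hneg : v < 0
      · obtain ⟨ih1, ih2, ih3⟩ := ih hs' t ht
        refine ⟨ih1, ?_, ?_⟩
        · simp only [List.mem_cons, not_or]
          exact ⟨by omega, ih2⟩
        · simp only [pvIco, List.countP_cons, decide_eq_true_eq] at ih3 ⊢
          rw [if_neg (by omega)]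
          exact ih3
      · have hvt : t < v := by omega
        rw [pvB_stuck l t (fun y hy => lt_trans hvt (hv y hy))]
        refine ⟨le_refl _, ?_, ?_⟩
        · simp only [List.mem_cons, not_or]
          exact ⟨by omega, fun hmem => absurd (hv t hmem) (by omega)⟩
        · have hz : pvIco (v :: l) 0 t = 0 := by
            simp only [pvIco]
            rw [List.countP_eq_zero]
            intro y hy
            simp only [decide_eq_true_eq]
            rcases List.mem_cons.mp hy with h | h
            · omega
            · have := hv y h; omega
          rw [hz]; omega

-- the characterisation '0 ≤ m, m ∉ L, #(L ∩ [0,m)) = m - t' has a unique solution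
lemma pvMissing_unique (L : List Int) (hnd : L.Nodup) (t : Int)
    (m1 m2 : Int) (h1 : 0 ≤ m1 ∧ m1 ∉ L ∧ (pvIco L 0 m1 : Int) = m1 - t)
    (h2 : 0 ≤ m2 ∧ m2 ∉ L ∧ (pvIco L 0 m2 : Int) = m2 - t) : m1 = m2 := by
  have key : ∀ a b : Int, 0 ≤ a → a ∉ L → (pvIco L 0 a : Int) = a - t →
      (pvIco L 0 b : Int) = b - t → ¬ a < b := by
    intro a b ha han hca hcb hab
    have hsplit : pvIco L 0 b = pvIco L 0 a + pvIco L a b :=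
      pvIco_split L 0 a b ha (by omega)
    have hsplit2 : pvIco L a b = pvIco L a (a + 1) + pvIco L (a + 1) b :=
      pvIco_split L a (a + 1) b (by omega) (by omega)
    have hz : pvIco L a (a + 1) = 0 := pvIco_unit_not_mem L a han
    have hle := pvIco_le L hnd (a + 1) b
    omega
  rcases lt_trichotomy m1 m2 with h | h | h
  · exact absurd h (key m1 m2 h1.1 h1.2.1 h1.2.2 h2.2.2)
  · exact h
  · exact absurd h (key m2 m1 h2.1 h2.2.1 h2.2.2 h1.2.2)

-- A's indexed early-return loop vs B's greedy take counter
lemma pvSel_eq (B : List (Int × Int)) (K : Int) :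
    pvEnumLoop B K = (B.length : Int) - pvTake (B.map Prod.fst) K := by
  induction B generalizing K with
  | nil => simp [pvEnumLoop, pvTake]
  | cons p rest ih =>
    obtain ⟨c, a⟩ := p
    simp only [pvEnumLoop, pvTake, List.map_cons, List.length_cons]
    by_cases hK : K - c < 0
    · rw [if_pos hK, if_pos (by omega)]
      push_cast; omega
    · rw [if_neg hK, if_neg (by omega)]
      rw [ih (K - c)]
      push_cast; omega

-- Python's lexicographic tuple comparison, as sorted2 uses it
def pvBlex (a b : Int × Int) : Bool :=
  decide (a.1 < b.1) || (!decide (b.1 < a.1) && decide (a.2 < b.2))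

def pvSle (a b : Int × Int) : Prop := pvBlex b a = false

lemma pvBlex_asymm (a b : Int × Int) (h : pvBlex a b = true) : pvBlex b a = false := by
  obtain ⟨a1, a2⟩ := a; obtain ⟨b1, b2⟩ := b
  simp [pvBlex] at *
  omega

lemma pvSle_trans (a b c : Int × Int) (h1 : pvSle a b) (h2 : pvSle b c) : pvSle a c := by
  obtain ⟨a1, a2⟩ := a; obtain ⟨b1, b2⟩ := b; obtain ⟨c1, c2⟩ := c
  simp [pvSle, pvBlex] at *
  omega

lemma pvInsertBy_pairwise (x : Int × Int) (ys : List (Int × Int)) (h : ys.Pairwise pvSle) :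
    (PySem.List.insertBy pvBlex x ys).Pairwise pvSle := by
  induction ys with
  | nil => simp [PySem.List.insertBy]
  | cons y ys ih =>
    rw [show PySem.List.insertBy pvBlex x (y :: ys) =
        if pvBlex x y then x :: y :: ys else y :: PySem.List.insertBy pvBlex x ys from rfl]
    have hy : ∀ z ∈ ys, pvSle y z := fun z hz => List.rel_of_pairwise_cons h hz
    by_cases hb : pvBlex x y = true
    · rw [if_pos hb]
      refine List.Pairwise.cons ?_ h
      intro z hz
      rcases List.mem_cons.mp hz with hz | hz
      · subst hz; exact pvBlex_asymm x z hb
      · exact pvSle_trans x y z (pvBlex_asymm x y hb) (hy z hz)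
    · rw [if_neg hb]
      refine List.Pairwise.cons ?_ (ih h.of_cons)
      intro z hz
      rcases (PySem.List.mem_insertBy pvBlex x z ys).mp hz with hz | hz
      · rw [hz]; exact (Bool.eq_false_iff.mpr hb : pvBlex x y = false)
      · exact hy z hz

lemma pvFoldlInsertBy_pairwise (P acc : List (Int × Int)) (h : acc.Pairwise pvSle) :
    (P.foldl (fun acc x => PySem.List.insertBy pvBlex x acc) acc).Pairwise pvSle := by
  induction P generalizing acc with
  | nil => exact h
  | cons p P ih => exact ih _ (pvInsertBy_pairwise p acc h)

lemma pvSorted2_pairwise (P : List (Int × Int)) :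
    (PySem.List.sorted2 P Prod.fst Prod.snd).Pairwise pvSle := by
  have hdef : PySem.List.sorted2 P Prod.fst Prod.snd =
      P.foldl (fun acc x => PySem.List.insertBy pvBlex x acc) [] := rfl
  rw [hdef]
  exact pvFoldlInsertBy_pairwise P [] (by simp)

lemma pvMapFst_sorted2 (P : List (Int × Int)) :
    (PySem.List.sorted2 P Prod.fst Prod.snd).map Prod.fst =
      PySem.List.sorted (P.map Prod.fst) (fun x => x) := by
  have hp1 : ((PySem.List.sorted2 P Prod.fst Prod.snd).map Prod.fst).Pairwise (· ≤ ·) := by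
    refine List.Pairwise.map Prod.fst ?_ (pvSorted2_pairwise P)
    intro a b hab
    obtain ⟨a1, a2⟩ := a; obtain ⟨b1, b2⟩ := b
    simp [pvSle, pvBlex] at hab
    omega
  have hp2 : (PySem.List.sorted (P.map Prod.fst) (fun x => x)).Pairwise (· ≤ ·) := by
    have := PySem.List.sorted_pairwise (P.map Prod.fst) (fun x => x)
    simpa using this
  have hperm : ((PySem.List.sorted2 P Prod.fst Prod.snd).map Prod.fst).Perm
      (PySem.List.sorted (P.map Prod.fst) (fun x => x)) := by
    refine ((PySem.List.sorted2_perm P Prod.fst Prod.snd false).map Prod.fst).trans ?_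
    exact (PySem.List.sorted_perm (P.map Prod.fst) (fun x => x) false).symm
  exact List.Perm.eq_of_pairwise (fun a b _ _ h1 h2 => le_antisymm h1 h2) hp1 hp2 hperm

-- the else-branch of both programs agree, for any dict with distinct keys
lemma pvCore (K : Int) (cnt : PySem.Dict Int Int) (hnd : cnt.keys.Nodup) :
    (let M0 : Int := (PySem.List.pyRange 0 K 1).foldl (fun M _ => pvSkip cnt.keys M + 1) 0
     let M : Int := pvSkip cnt.keys M0
     let B : List (Int × Int) :=
       PySem.List.sorted2 ((cnt.items.filter (fun p => decide (p.1 > M))).map (fun p => (p.2, p.1)))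
         Prod.fst Prod.snd
     pvEnumLoop B K) =
    (let m : Int :=
       (PySem.List.sorted cnt.keys (fun x => x)).foldl
         (fun m v => if 0 ≤ v ∧ v ≤ m then m + 1 else m) (if K > 0 then K else 0)
     let counts : List Int :=
       PySem.List.sorted ((cnt.items.filter (fun p => decide (p.1 > m))).map Prod.snd) (fun x => x)
     (counts.length : Int) - pvTake counts K) := by
  simp only []
  set L := cnt.keys with hL
  set M0 : Int := (PySem.List.pyRange 0 K 1).foldl (fun M _ => pvSkip L M + 1) 0 with hM0
  set MA : Int := pvSkip L M0 with hMAdef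
  set t0 : Int := if K > 0 then K else 0 with ht0
  set mB : Int := (PySem.List.sorted L (fun x => x)).foldl
    (fun m v => if 0 ≤ v ∧ v ≤ m then m + 1 else m) t0 with hmBdef
  -- A-side characterisation of MA
  obtain ⟨h0M0, hcM0⟩ := pvA_loop L hnd (PySem.List.pyRange 0 K 1) 0 0 (le_refl 0)
    (by rw [pvIco_empty L 0 0 (le_refl 0)]; simp)
  rw [← hM0] at h0M0 hcM0
  obtain ⟨hleA, hnmA, hallA⟩ := pvSkip_spec L M0
  rw [← hMAdef] at hleA hnmA hallA
  have hsplitA : pvIco L 0 MA = pvIco L 0 M0 + pvIco L M0 MA :=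
    pvIco_split L 0 M0 MA h0M0 hleA
  have hfullA : (pvIco L M0 MA : Int) = MA - M0 := pvIco_full L hnd M0 MA hleA hallA
  have hlen : ((PySem.List.pyRange 0 K 1).length : Int) = ((K.toNat : Nat) : Int) := by
    rw [PySem.List.length_pyRange_one]; simp
  have hAchar : 0 ≤ MA ∧ MA ∉ L ∧ (pvIco L 0 MA : Int) = MA - ((K.toNat : Nat) : Int) := by
    refine ⟨by omega, hnmA, ?_⟩
    push_cast at hcM0 hsplitA ⊢
    omega
  -- B-side characterisation of mB
  have hpw : (PySem.List.sorted L (fun x => x)).Pairwise (· < ·) := by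
    have h1 := PySem.List.sorted_pairwise L (fun x => x)
    have h2 : (PySem.List.sorted L (fun x => x)).Nodup :=
      (PySem.List.sorted_perm L (fun x => x) false).nodup_iff.mpr hnd
    exact (h1.and h2).imp (fun h => lt_of_le_of_ne h.1 h.2)
  have ht00 : 0 ≤ t0 := by rw [ht0]; split_ifs <;> omega
  have ht0K : t0 = ((K.toNat : Nat) : Int) := by rw [ht0]; split_ifs <;> omega
  obtain ⟨hleB, hnmB, hcB⟩ := pvB_fold _ hpw t0 ht00
  rw [← hmBdef] at hleB hnmB hcB
  have hperm := PySem.List.sorted_perm L (fun x => x) false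
  have hBchar : 0 ≤ mB ∧ mB ∉ L ∧ (pvIco L 0 mB : Int) = mB - ((K.toNat : Nat) : Int) := by
    refine ⟨by omega, fun hm => hnmB (hperm.mem_iff.mpr hm), ?_⟩
    have hCP : pvIco (PySem.List.sorted L (fun x => x)) 0 mB = pvIco L 0 mB := by
      unfold pvIco; exact hperm.countP_eq _
    rw [← hCP, hcB, ht0K]
  have hMm : MA = mB := pvMissing_unique L hnd ((K.toNat : Nat) : Int) MA mB hAchar hBchar
  rw [← hMm]
  -- selection part
  rw [pvSel_eq, pvMapFst_sorted2]
  have hPC : (((cnt.items.filter (fun p => decide (p.1 > MA))).map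
      (fun p => (p.2, p.1))).map Prod.fst) =
      (cnt.items.filter (fun p => decide (p.1 > MA))).map Prod.snd := by
    simp [List.map_map, Function.comp]
  rw [hPC]
  have hlen2 : ((PySem.List.sorted2 ((cnt.items.filter (fun p => decide (p.1 > MA))).map
      (fun p => (p.2, p.1))) Prod.fst Prod.snd).length : Int) =
      ((PySem.List.sorted ((cnt.items.filter (fun p => decide (p.1 > MA))).map Prod.snd)
        (fun x => x)).length : Int) := by
    rw [(PySem.List.sorted2_perm _ Prod.fst Prod.snd false).length_eq,
      PySem.List.length_sorted]
    simp
  rw [hlen2]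

lemma pvSolve_eq (N K : Int) (A : List Int) : solve N K A = solve_alt N K A := by
  unfold solve solve_alt
  by_cases hKN : K ≥ N
  · rw [if_pos hKN, if_pos hKN]
  · rw [if_neg hKN, if_neg hKN]
    have hnd : (A.foldl (fun d a => d.insert a (d.getD a 0 + 1))
        (PySem.Dict.empty : PySem.Dict Int Int)).keys.Nodup :=
      PySem.Dict.nodup_keys_foldl_insert A (fun d a => d.getD a 0 + 1) PySem.Dict.empty
        PySem.Dict.nodup_keys_empty
    exact pvCore K _ hnd

-- ===== VERDICT (by name: the statement is the Claim_ definition above) =====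
theorem solve_spec : Claim_equal_solve := by
  intro N K A _
  exact pvSolve_eq N K A
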